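-- pv_equiv track=rewrite | github.com/mahditmx/Cbase | ZDbyte.py | unlock_text
-- ===== SOURCE A (Python) =====
-- def unlock_text(key,str):
--     # fakelist = ['l', 'g', 'u', '?', 'j', 'd', 't', 'a', '1', 'x', 'f', 'c', '3', 'r', 'v', 'q', 'b',
--     #         '0', 'p', 'k', 'w', 'h', 'i', '2', 'm', 'e', '6', 's', '8', 'n', 'z', '7', 'y', 'o', '4', '9', '5',"!","@","#","$","%","^","&","*",'(',")","-","=","+","/","+","."]
--
--
--     # orglist = ["a", "b", 'c', 'd', 'e', 'f', 'g', 'h', 'i', 'j', 'k', 'l', 'm', 'n', 'o', 'p', 'q', 'r',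
--     #         's', 't', 'u', 'v', 'w', 'x', 'y', 'z', '1', '2', '3', '4', '5', '6', '7', '8', '9', '0', " ","!","@","#","$","%","^","&","*",'(',")","-","=","+","/","+","."]
--     fakelist = ["a", "b", 'c', 'd', 'e', 'f', 'g', 'h', 'i', 'j', 'k', 'l', 'm', 'n', 'o', 'p', 'q', 'r', 'b',"A","B","C","D","E","F","G","H","I","J","K","L","M","N","O","P","Q","R","S","T","U","V","W","X","Y","Z",
--                 's', 't', 'u', 'v', 'w', 'x', 'y', 'z', '1', '2', '3', '4', '5', '6', '7', '8', '9', '0', " ","!","@","#","$","%","^","&","*",'(',")","-","=","+","/","+",".","_","\\","\n","\t"," ","'",'"',":","[",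
--                 "]","{","}",",","|","<",">","?","`","~","─","_"]
--
--
--     orglist = ["a", "b", 'c', 'd', 'e', 'f', 'g', 'h', 'i', 'j', 'k', 'l', 'm', 'n', 'o', 'p', 'q', 'r', 'b',"A","B","C","D","E","F","G","H","I","J","K","L","M","N","O","P","Q","R","S","T","U","V","W","X","Y","Z",
--                 's', 't', 'u', 'v', 'w', 'x', 'y', 'z', '1', '2', '3', '4', '5', '6', '7', '8', '9', '0', " ","!","@","#","$","%","^","&","*",'(',")","-","=","+","/","+",".","_","\\","\n","\t"," ","'",'"',":","[",
--                 "]","{","}",",","|","<",">","?","`","~","─","_"]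
--
--     num = 0
--
--
--     for i in key:
--         indexed = orglist.index(i)
--         num += indexed
--
--     for i in range(num):
--         fakenum = fakelist[0]
--         fakelist.remove(fakenum)
--         fakelist.append(fakenum)
--
--     normaltext = ''
--     for c in str:
--         normaltext += orglist[fakelist.index(c)]
--
--     return normaltext
-- ===== SOURCE B (Python) =====
-- def _first_idx(lst):
--     # first-occurrence index of each character (duplicates keep the first slot)
--     idx = {}
--     for i, ch in enumerate(lst):
--         if ch not in idx:
--             idx[ch] = i
--     return idx
--
-- def unlock_text(key, str):
--     base = ["a", "b", 'c', 'd', 'e', 'f', 'g', 'h', 'i', 'j', 'k', 'l', 'm', 'n', 'o', 'p', 'q', 'r', 'b',"A","B","C","D","E","F","G","H","I","J","K","L","M","N","O","P","Q","R","S","T","U","V","W","X","Y","Z",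
--                 's', 't', 'u', 'v', 'w', 'x', 'y', 'z', '1', '2', '3', '4', '5', '6', '7', '8', '9', '0', " ","!","@","#","$","%","^","&","*",'(',")","-","=","+","/","+",".","_","\\","\n","\t"," ","'",'"',":","[",
--                 "]","{","}",",","|","<",">","?","`","~","─","_"]
--     idx0 = _first_idx(base)
--     num = sum(idx0[c] for c in key)
--     s = num % len(base)
--     rotated = base[s:] + base[:s]
--     idx = _first_idx(rotated)
--     return ''.join(base[idx[c]] for c in str)
-- ===== Notes on version B (the rewrite author's own statement) =====
-- stated objective: faster
-- what changed: B replaces A's num-step one-by-one list rotation and per-character linear list.index scans by a single slice rotation by num % len(base) plus precomputed first-occurrence index dictionaries for both the key sum and the decode lookup.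
import Mathlib
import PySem

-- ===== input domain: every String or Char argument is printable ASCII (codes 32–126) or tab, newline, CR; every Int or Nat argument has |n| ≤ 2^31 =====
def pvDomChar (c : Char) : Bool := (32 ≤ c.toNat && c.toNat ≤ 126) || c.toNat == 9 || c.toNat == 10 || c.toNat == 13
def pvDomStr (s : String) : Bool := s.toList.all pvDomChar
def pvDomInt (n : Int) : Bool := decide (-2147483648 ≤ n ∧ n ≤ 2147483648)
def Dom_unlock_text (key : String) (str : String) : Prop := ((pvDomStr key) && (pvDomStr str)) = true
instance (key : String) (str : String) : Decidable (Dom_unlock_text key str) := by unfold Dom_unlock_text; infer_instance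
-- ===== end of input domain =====

-- B replaces the num-step one-by-one rotation and the per-character linear scans of A by one
-- slice rotation (num % L) and first-occurrence index dictionaries (objective: faster).

-- ===== PORT A =====
def pvFakeList : List Char := [
'a', 'b', 'c', 'd', 'e', 'f', 'g', 'h', 'i', 'j', 'k', 'l', 'm', 'n', 'o', 'p', 'q', 'r', 'b', 'A',
'B', 'C', 'D', 'E', 'F', 'G', 'H', 'I', 'J', 'K', 'L', 'M', 'N', 'O', 'P', 'Q', 'R', 'S', 'T', 'U',
'V', 'W', 'X', 'Y', 'Z', 's', 't', 'u', 'v', 'w', 'x', 'y', 'z', '1', '2', '3', '4', '5', '6', '7',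
'8', '9', '0', ' ', '!', '@', '#', '$', '%', '^', '&', '*', '(', ')', '-', '=', '+', '/', '+', '.',
'_', '\\', '\n', '\t', ' ', '\'', '"', ':', '[', ']', '{', '}', ',', '|', '<', '>', '?', '`', '~',
'─', '_']

def pvOrgList : List Char := [
'a', 'b', 'c', 'd', 'e', 'f', 'g', 'h', 'i', 'j', 'k', 'l', 'm', 'n', 'o', 'p', 'q', 'r', 'b', 'A',
'B', 'C', 'D', 'E', 'F', 'G', 'H', 'I', 'J', 'K', 'L', 'M', 'N', 'O', 'P', 'Q', 'R', 'S', 'T', 'U',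
'V', 'W', 'X', 'Y', 'Z', 's', 't', 'u', 'v', 'w', 'x', 'y', 'z', '1', '2', '3', '4', '5', '6', '7',
'8', '9', '0', ' ', '!', '@', '#', '$', '%', '^', '&', '*', '(', ')', '-', '=', '+', '/', '+', '.',
'_', '\\', '\n', '\t', ' ', '\'', '"', ':', '[', ']', '{', '}', ',', '|', '<', '>', '?', '`', '~',
'─', '_']

-- one iteration of A's rotation loop: fakenum = fakelist[0]; fakelist.remove(fakenum); fakelist.append(fakenum)
def pvRotStep (l : List Char) : List Char :=
  match PySem.List.pyGet? l 0 with
  | none => l            -- Python would raise IndexError; unreachable (the list is never empty)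
  | some fakenum => ((PySem.List.remove? l fakenum).getD l) ++ [fakenum]

def unlock_text (key : String) (str : String) : String :=
  let fakelist := pvFakeList
  let orglist := pvOrgList
  let num : Int := key.toList.foldl (fun num i =>
      match PySem.List.index? orglist i with
      | some indexed => num + (indexed : Int)
      | none => num) 0   -- none = ValueError in Python; excluded by Pre_
  let fakelist := (PySem.List.pyRange 0 num 1).foldl (fun l _ => pvRotStep l) fakelist
  let normaltext : List Char := str.toList.foldl (fun acc c =>
      match PySem.List.index? fakelist c with
      | some i => acc ++ [PySem.List.pyGetD orglist (i : Int) ' ']  -- i < len(orglist): default unused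
      | none => acc) []  -- none = ValueError in Python; excluded by Pre_
  String.ofList normaltext

-- ===== PORT B =====
def pvBase : List Char := [
'a', 'b', 'c', 'd', 'e', 'f', 'g', 'h', 'i', 'j', 'k', 'l', 'm', 'n', 'o', 'p', 'q', 'r', 'b', 'A',
'B', 'C', 'D', 'E', 'F', 'G', 'H', 'I', 'J', 'K', 'L', 'M', 'N', 'O', 'P', 'Q', 'R', 'S', 'T', 'U',
'V', 'W', 'X', 'Y', 'Z', 's', 't', 'u', 'v', 'w', 'x', 'y', 'z', '1', '2', '3', '4', '5', '6', '7',
'8', '9', '0', ' ', '!', '@', '#', '$', '%', '^', '&', '*', '(', ')', '-', '=', '+', '/', '+', '.',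
'_', '\\', '\n', '\t', ' ', '\'', '"', ':', '[', ']', '{', '}', ',', '|', '<', '>', '?', '`', '~',
'─', '_']

-- Source B's _first_idx: first-occurrence index of each character
def pvFirstIdx (l : List Char) : PySem.Dict Char Int :=
  (PySem.List.enumerate l).foldl
    (fun d p => if d.contains p.2 then d else d.insert p.2 p.1) PySem.Dict.empty

def unlock_text_alt (key : String) (str : String) : String :=
  let idx0 := pvFirstIdx pvBase
  let num : Int := key.toList.foldl (fun n c => n + idx0.getD c 0) 0
  let s : Int := PySem.Int.mod num (pvBase.length : Int)
  let rotated := PySem.List.slice pvBase (some s) none ++ PySem.List.slice pvBase none (some s)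
  let idx := pvFirstIdx rotated
  String.ofList (str.toList.map (fun c => PySem.List.pyGetD pvBase (idx.getD c 0) ' '))

-- ===== PRECONDITION & SPEC =====
-- Pre_ excludes exactly the inputs on which A raises ValueError: a character of key or str
-- that does not occur in the cipher alphabet.
def Pre_unlock_text (key : String) (str : String) : Prop :=
  (key.toList.all (fun c => pvBase.contains c)
    && str.toList.all (fun c => pvBase.contains c)) = true
instance (key : String) (str : String) : Decidable (Pre_unlock_text key str) := by
  unfold Pre_unlock_text; infer_instance

def pvWitness_unlock_text : String × String := ("ab", "hello")

def Spec_unlock_text (key : String) (str : String) (out : String) : Prop := out = unlock_text_alt key str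
instance (key : String) (str : String) (out : String) : Decidable (Spec_unlock_text key str out) := by unfold Spec_unlock_text; infer_instance

-- ===== CLAIM (what is proved, stated in full; the proofs are below) =====
def Claim_equal_unlock_text : Prop := ∀ (key : String) (str : String), Dom_unlock_text key str → Pre_unlock_text key str → Spec_unlock_text key str (unlock_text key str)

-- ===== LEMMAS AND PROOFS =====

theorem pv_fake_eq_base : pvFakeList = pvBase := rfl
theorem pv_org_eq_base : pvOrgList = pvBase := rfl

-- the first-occurrence fold never touches keys already present
theorem pv_firstIdx_preserved (ps : List (Int × Char)) (d : PySem.Dict Char Int) (c : Char)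
    (h : d.contains c = true) :
    (ps.foldl (fun d p => if d.contains p.2 then d else d.insert p.2 p.1) d).getD c 0
      = d.getD c 0 := by
  induction ps generalizing d with
  | nil => rfl
  | cons p ps ih =>
    simp only [List.foldl_cons]
    by_cases hp : d.contains p.2
    · rw [if_pos hp, ih d h]
    · rw [if_neg hp]
      have hne : c ≠ p.2 := fun he => hp (he ▸ h)
      rw [ih _ (by simp [PySem.Dict.contains_insert, h]), PySem.Dict.getD_insert, if_neg hne]

-- first-occurrence dict lookup = list.index
theorem pv_firstIdx_getD (l : List Char) (s : Int) (d : PySem.Dict Char Int) (c : Char)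
    (hc : c ∈ l) (hd : d.contains c = false) :
    ((PySem.List.enumerate l s).foldl (fun d p => if d.contains p.2 then d else d.insert p.2 p.1) d).getD c 0
      = s + (((PySem.List.index? l c).getD 0 : Nat) : Int) := by
  induction l generalizing s d with
  | nil => simp at hc
  | cons x xs ih =>
    rw [PySem.List.enumerate_cons]
    simp only [List.foldl_cons]
    by_cases hcx : c = x
    · subst hcx
      rw [if_neg (by simp [hd]), PySem.List.index?_cons_self]
      rw [pv_firstIdx_preserved _ _ _ (by simp [PySem.Dict.contains_insert_self])]
      rw [PySem.Dict.getD_insert, if_pos rfl]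
      simp
    · have hx : c ∈ xs := by
        rcases List.mem_cons.mp hc with h | h
        · exact absurd h hcx
        · exact h
      have hxc : x ≠ c := fun he => hcx he.symm
      rw [PySem.List.index?_cons_of_ne xs hxc]
      have hsome : (PySem.List.index? xs c).isSome := by
        rw [PySem.List.index?_eq_idxOf?]; exact List.isSome_idxOf?.mpr hx
      obtain ⟨k, hk⟩ := Option.isSome_iff_exists.mp hsome
      by_cases hdx : d.contains x
      · rw [if_pos hdx, ih (s+1) d hx hd, hk]
        simp; ring
      · rw [if_neg hdx]
        rw [ih (s+1) _ hx (by simp [PySem.Dict.contains_insert, hd, hcx]), hk]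
        simp; ring

theorem pv_firstIdx_spec (l : List Char) (c : Char) (hc : c ∈ l) :
    (pvFirstIdx l).getD c 0 = (((PySem.List.index? l c).getD 0 : Nat) : Int) := by
  unfold pvFirstIdx
  rw [pv_firstIdx_getD l 0 _ c hc (PySem.Dict.contains_empty c)]
  ring

-- A's key loop produces a nonnegative number
theorem pv_numA_nonneg (cs : List Char) (acc : Int) (h : 0 ≤ acc) :
    0 ≤ cs.foldl (fun num i =>
      match PySem.List.index? pvOrgList i with
      | some indexed => num + (indexed : Int)
      | none => num) acc := by
  induction cs generalizing acc with
  | nil => exact h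
  | cons x xs ih =>
    simp only [List.foldl_cons]
    cases PySem.List.index? pvOrgList x with
    | none => exact ih acc h
    | some i => exact ih _ (by positivity)

-- a fold that ignores the elements is function iteration
theorem pv_foldl_const_iterate (f : List Char → List Char) (xs : List Int) (init : List Char) :
    xs.foldl (fun l _ => f l) init = f^[xs.length] init := by
  induction xs generalizing init with
  | nil => rfl
  | cons x xs ih => simp [List.foldl_cons, ih, Function.iterate_succ_apply]

theorem pv_rotStep_eq (x : Char) (xs : List Char) : pvRotStep (x :: xs) = xs ++ [x] := by
  unfold pvRotStep
  simp [PySem.List.pyGet?, PySem.List.pyIdx?]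

theorem pv_iterate_rotStep (n : Nat) (l : List Char) (h : l ≠ []) :
    pvRotStep^[n] l = l.rotate n := by
  induction n generalizing l with
  | zero => simp
  | succ n ih =>
    rw [Function.iterate_succ_apply]
    cases l with
    | nil => exact absurd rfl h
    | cons x xs =>
      rw [pv_rotStep_eq, ih _ (by simp), ← List.rotate_cons_succ]

-- A's decode loop over a rotated alphabet = B's dictionary decode map
theorem pv_decode_eq (cs rot : List Char) (hmem : ∀ c ∈ cs, c ∈ rot) :
    List.foldl (fun acc c =>
      match PySem.List.index? rot c with
      | some i => acc ++ [PySem.List.pyGetD pvOrgList (i : Int) ' ']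
      | none => acc) [] cs
    = cs.map (fun c => PySem.List.pyGetD pvBase ((pvFirstIdx rot).getD c 0) ' ') := by
  have h : ∀ (acc : List Char) (c : Char), c ∈ cs →
      (match PySem.List.index? rot c with
       | some i => acc ++ [PySem.List.pyGetD pvOrgList (i : Int) ' ']
       | none => acc)
      = acc ++ [PySem.List.pyGetD pvBase ((pvFirstIdx rot).getD c 0) ' '] := by
    intro acc c hc
    have hcr := hmem c hc
    have hsome : (PySem.List.index? rot c).isSome := by
      rw [PySem.List.index?_eq_idxOf?]; exact List.isSome_idxOf?.mpr hcr
    obtain ⟨i, hk⟩ := Option.isSome_iff_exists.mp hsome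
    rw [pv_firstIdx_spec rot c hcr, hk]
    simp [pv_org_eq_base]
  rw [PySem.List.foldl_congr_mem _ _ _ _ h, PySem.List.foldl_append_singleton_eq_map]
  simp

-- ===== VERDICT (by name: the statement is the Claim_ definition above) =====
theorem unlock_text_spec : Claim_equal_unlock_text := by
  intro key str hdom hpre
  unfold Pre_unlock_text at hpre
  simp only [Bool.and_eq_true, List.all_eq_true] at hpre
  obtain ⟨hkey', hstr'⟩ := hpre
  have hkey : ∀ c ∈ key.toList, c ∈ pvBase := fun c hc => by simpa using hkey' c hc
  have hstr : ∀ c ∈ str.toList, c ∈ pvBase := fun c hc => by simpa using hstr' c hc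
  unfold Spec_unlock_text unlock_text unlock_text_alt
  simp only []
  -- the two key sums agree
  have hnum : List.foldl (fun num i =>
        match PySem.List.index? pvOrgList i with
        | some indexed => num + (indexed : Int)
        | none => num) 0 key.toList
      = List.foldl (fun n c => n + (pvFirstIdx pvBase).getD c 0) 0 key.toList := by
    have h : ∀ (acc : Int) (c : Char), c ∈ key.toList →
        (match PySem.List.index? pvOrgList c with
         | some indexed => acc + (indexed : Int)
         | none => acc)
        = acc + (pvFirstIdx pvBase).getD c 0 := by
      intro acc c hc
      have hcb := hkey c hc
      have hsome : (PySem.List.index? pvOrgList c).isSome := by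
        rw [PySem.List.index?_eq_idxOf?]
        exact List.isSome_idxOf?.mpr (pv_org_eq_base ▸ hcb)
      obtain ⟨i, hk⟩ := Option.isSome_iff_exists.mp hsome
      rw [pv_firstIdx_spec pvBase c hcb, ← pv_org_eq_base, hk]
      simp
    exact PySem.List.foldl_congr_mem _ _ _ _ h
  have hnn : 0 ≤ List.foldl (fun n c => n + (pvFirstIdx pvBase).getD c 0) 0 key.toList :=
    hnum ▸ pv_numA_nonneg key.toList 0 le_rfl
  rw [hnum]
  generalize hN : List.foldl (fun n c => n + (pvFirstIdx pvBase).getD c 0) 0 key.toList = num at hnn ⊢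
  obtain ⟨n, rfl⟩ : ∃ m : Nat, num = (m : Int) := ⟨num.toNat, (Int.toNat_of_nonneg hnn).symm⟩
  -- A's step-by-step rotation is a rotate …
  have hrotA : List.foldl (fun l _ => pvRotStep l) pvFakeList (PySem.List.pyRange 0 (n : Int) 1)
      = pvBase.rotate n := by
    rw [pv_foldl_const_iterate, PySem.List.length_pyRange_one]
    norm_num
    rw [pv_fake_eq_base]
    exact pv_iterate_rotStep n pvBase (by rw [pvBase]; exact List.cons_ne_nil _ _)
  -- … and so is B's slice rotation
  have hrotB : PySem.List.slice pvBase (some (PySem.Int.mod (n : Int) (pvBase.length : Int))) none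
        ++ PySem.List.slice pvBase none (some (PySem.Int.mod (n : Int) (pvBase.length : Int)))
      = pvBase.rotate n := by
    rw [PySem.Int.mod_natCast, PySem.List.slice_from_natCast, PySem.List.slice_to_natCast]
    rw [← List.rotate_mod pvBase n]
    exact (List.rotate_eq_drop_append_take
      (Nat.le_of_lt (Nat.mod_lt _ (by rw [pvBase]; simp)))).symm
  rw [hrotA, hrotB]
  exact congrArg String.ofList (pv_decode_eq str.toList (pvBase.rotate n)
    (fun c hc => (List.mem_rotate).mpr (hstr c hc)))
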